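-- pv_equiv track=rewrite | github.com/TessFerrandez/algorithms | contest/bw-79/lc-m-2284-sender-with-largest-word-count.py | largestWordCount1
-- ===== SOURCE A (Python) =====
-- from collections import defaultdict
-- from typing import List
--
-- def largestWordCount1(messages: List[str], senders: List[str]) -> str:
--     counts = defaultdict(int)
--
--     max_count = 0
--     best = ''
--
--     for i in range(len(messages)):
--         counts[senders[i]] += len(messages[i].split(' '))
--         num_words = counts[senders[i]]
--         if num_words >= max_count:
--             if max_count == num_words:
--                 best = senders[i] if senders[i] > best else best
--             else:
--                 max_count = num_words
--                 best = senders[i]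
--
--     return best
-- ===== SOURCE B (Python) =====
-- from typing import List
--
--
-- def largestWordCount1(messages: List[str], senders: List[str]) -> str:
--     # Phase 1: build the word-count table.
--     counts = {}
--     for sender, message in zip(senders, messages):
--         counts[sender] = counts.get(sender, 0) + len(message.split(' '))
--     # Phase 2: pick the winner (largest count, ties -> lexicographically larger name).
--     if not counts:
--         return ''
--     return max(counts, key=lambda s: (counts[s], s))
-- ===== Notes on version B (the rewrite author's own statement) =====
-- stated objective: simpler
-- what changed: A's single fused scan that maintains max_count/best online with hand-written tie-break logic is replaced by a two-phase build-then-reduce: one pass builds the counts dict, then max(counts, key=lambda s: (counts[s], s)) selects the winner, with an explicit empty guard.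
import Mathlib
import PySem

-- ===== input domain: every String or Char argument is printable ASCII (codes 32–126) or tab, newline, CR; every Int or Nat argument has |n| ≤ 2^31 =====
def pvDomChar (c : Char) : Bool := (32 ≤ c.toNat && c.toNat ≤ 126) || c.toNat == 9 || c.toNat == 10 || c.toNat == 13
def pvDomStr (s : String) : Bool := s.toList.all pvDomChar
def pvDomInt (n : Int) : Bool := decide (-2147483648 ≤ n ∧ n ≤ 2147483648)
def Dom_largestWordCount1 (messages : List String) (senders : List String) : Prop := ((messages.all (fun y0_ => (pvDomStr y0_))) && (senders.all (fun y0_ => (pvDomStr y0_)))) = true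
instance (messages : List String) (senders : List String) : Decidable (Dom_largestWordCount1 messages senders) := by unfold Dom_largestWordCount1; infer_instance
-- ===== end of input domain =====

-- B replaces A's fused online max/tie-break scan by a two-phase build-then-reduce
-- (build the counts dict, then select by max with key (count, name)); objective: simpler.

-- len(m.split(' ')) — the word count of one message (shared by both Pythons verbatim)
def pvWC (m : String) : Int := PySem.List.len ((PySem.Str.split? m " ").getD [])

-- ===== PORT A =====
def largestWordCount1 (messages : List String) (senders : List String) : String :=
  ((PySem.List.pyRange 0 (PySem.List.len messages) 1).foldl
    (fun st i =>
      let s := PySem.List.pyGetD senders i ""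
      let counts := st.1.modify s 0 (· + pvWC (PySem.List.pyGetD messages i ""))
      let numWords := counts.getD s 0
      if st.2.1 ≤ numWords then
        if st.2.1 = numWords then
          (counts, st.2.1, if st.2.2 < s then s else st.2.2)
        else (counts, numWords, s)
      else (counts, st.2.1, st.2.2))
    ((PySem.Dict.empty : PySem.Dict String Int), ((0 : Int), ""))).2.2

-- ===== PORT B =====
def largestWordCount1_alt (messages : List String) (senders : List String) : String :=
  let counts := (senders.zip messages).foldl
    (fun d p => d.insert p.1 (d.getD p.1 0 + pvWC p.2))
    (PySem.Dict.empty : PySem.Dict String Int)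
  if counts.size = 0 then ""
  else (PySem.List.max2? counts.keys (fun s => counts.getD s 0) (fun s => s)).getD ""

-- ===== PRECONDITION & SPEC =====
-- A raises IndexError (senders[i]) iff messages is longer than senders.
def Pre_largestWordCount1 (messages : List String) (senders : List String) : Prop :=
  messages.length ≤ senders.length
instance (messages : List String) (senders : List String) : Decidable (Pre_largestWordCount1 messages senders) := by unfold Pre_largestWordCount1; infer_instance
def pvWitness_largestWordCount1 : List String × List String :=
  (["hello world", "hi"], ["alice", "bob"])

def Spec_largestWordCount1 (messages : List String) (senders : List String) (out : String) : Prop := out = largestWordCount1_alt messages senders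
instance (messages : List String) (senders : List String) (out : String) : Decidable (Spec_largestWordCount1 messages senders out) := by unfold Spec_largestWordCount1; infer_instance

-- ===== CLAIM (what is proved, stated in full; the proofs are below) =====
def Claim_equal_largestWordCount1 : Prop := ∀ (messages : List String) (senders : List String), Dom_largestWordCount1 messages senders → Pre_largestWordCount1 messages senders → Spec_largestWordCount1 messages senders (largestWordCount1 messages senders)

-- ===== LEMMAS AND PROOFS =====

-- python's str.split on a nonempty separator always yields at least one piece
lemma pvSplitGo_pos (sep : List Char) :
    ∀ (fuel : Nat) (l cur : List Char) (acc : List (List Char)),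
      1 ≤ (PySem.Chars.splitOn.go sep fuel l cur acc).length := by
  intro fuel
  induction fuel with
  | zero =>
    intro l cur acc
    simp [PySem.Chars.splitOn.go]
  | succ n ih =>
    intro l cur acc
    cases l with
    | nil => simp [PySem.Chars.splitOn.go]
    | cons c rest =>
      rw [PySem.Chars.splitOn.go]
      split
      · exact ih _ _ _
      · exact ih _ _ _

lemma pvWC_pos (m : String) : 1 ≤ pvWC m := by
  unfold pvWC
  have h := pvSplitGo_pos [' '] (m.length + 1) m.toList [] []
  simp [PySem.Str.split?, PySem.Chars.split?, PySem.Chars.splitOn, PySem.List.len]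
  omega

-- the loop bodies of the two ports, on one (sender, message) pair
def pvStepA (st : PySem.Dict String Int × Int × String) (p : String × String) :
    PySem.Dict String Int × Int × String :=
  let counts := st.1.insert p.1 (st.1.getD p.1 0 + pvWC p.2)
  let numWords := counts.getD p.1 0
  if st.2.1 ≤ numWords then
    if st.2.1 = numWords then (counts, st.2.1, if st.2.2 < p.1 then p.1 else st.2.2)
    else (counts, numWords, p.1)
  else (counts, st.2.1, st.2.2)

def pvStepB (d : PySem.Dict String Int) (p : String × String) : PySem.Dict String Int :=
  d.insert p.1 (d.getD p.1 0 + pvWC p.2)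

lemma pvStepA_fst (st : PySem.Dict String Int × Int × String) (p : String × String) :
    (pvStepA st p).1 = pvStepB st.1 p := by
  unfold pvStepA pvStepB
  dsimp only
  split_ifs <;> rfl

-- an index loop over range(len(messages)) reading senders[i]/messages[i] is a loop over the zip
lemma pvIndexFold {σ : Type} (f : σ → String × String → σ) (messages senders : List String)
    (h : messages.length ≤ senders.length) (init : σ) :
    (PySem.List.pyRange 0 (PySem.List.len messages) 1).foldl
        (fun st i => f st (PySem.List.pyGetD senders i "", PySem.List.pyGetD messages i "")) init
      = (senders.zip messages).foldl f init := by
  have hz : (senders.zip messages).length = messages.length := by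
    rw [List.length_zip]; omega
  have hlen : PySem.List.len messages = PySem.List.len (senders.zip messages) := by
    simp [PySem.List.len, hz]
  rw [hlen]
  rw [PySem.List.foldl_congr_mem _ _
      (fun st i => f st (PySem.List.pyGetD (senders.zip messages) i ("", ""))) init ?_]
  · exact PySem.List.foldl_pyRange_zero_pyGetD (senders.zip messages) ("", "") f init
  · intro acc i hi
    rw [PySem.List.mem_pyRange_one] at hi
    obtain ⟨h0, hlt⟩ := hi
    obtain ⟨k, rfl⟩ : ∃ k : Nat, i = (k : Int) := ⟨i.toNat, (Int.toNat_of_nonneg h0).symm⟩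
    have hk : k < (senders.zip messages).length := by
      simp only [PySem.List.len] at hlt; exact_mod_cast hlt
    have hkm : k < messages.length := by omega
    have hks : k < senders.length := by omega
    simp only [PySem.List.pyGetD_natCast]
    congr 1
    rw [List.getD_eq_getElem _ _ hk, List.getD_eq_getElem _ _ hkm,
      List.getD_eq_getElem _ _ hks, List.getElem_zip]

-- loop invariant of A's online scan: (m, b) is the lexicographic max of (count, sender)
def pvInv (d : PySem.Dict String Int) (m : Int) (b : String) : Prop :=
  d.keys.Nodup ∧
  (∀ p ∈ d.items, 1 ≤ p.2 ∧ (p.2 < m ∨ (p.2 = m ∧ p.1 ≤ b))) ∧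
  ((m = 0 ∧ b = "") ∨ (b, m) ∈ d.items)

lemma pvInv_step (d : PySem.Dict String Int) (m : Int) (b : String) (p : String × String)
    (h : pvInv d m b) :
    pvInv (pvStepB d p) (pvStepA (d, m, b) p).2.1 (pvStepA (d, m, b) p).2.2 := by
  obtain ⟨hnd, hdom, hach⟩ := h
  have hwc := pvWC_pos p.2
  have hgd : 0 ≤ d.getD p.1 0 := by
    by_cases hc : d.contains p.1 = true
    · have hs : (d.get? p.1).isSome := by rw [← PySem.Dict.contains_eq_isSome_get?]; exact hc
      obtain ⟨v, hv⟩ := Option.isSome_iff_exists.mp hs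
      have hm := PySem.Dict.mem_items_of_get?_eq_some d hv
      have := (hdom _ hm).1
      rw [PySem.Dict.getD_of_get?_eq_some d 0 hv]
      omega
    · rw [PySem.Dict.getD_of_not_contains d 0 (by simpa using hc)]
  set c' : Int := d.getD p.1 0 + pvWC p.2 with hc'
  have hc1 : 1 ≤ c' := by omega
  have hgb : ∀ v : Int, (b, v) ∈ d.items → d.getD b 0 = v := fun v hv =>
    PySem.Dict.getD_of_mem_items d hv hnd 0
  have hnd' : (pvStepB d p).keys.Nodup := by
    unfold pvStepB; exact PySem.Dict.nodup_keys_insert d p.1 _ hnd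
  have hmem : ∀ q : String × Int, q ∈ (pvStepB d p).items ↔ q = (p.1, c') ∨ (q ∈ d.items ∧ q.1 ≠ p.1) := by
    intro q; unfold pvStepB; exact PySem.Dict.mem_items_insert d p.1 _ q
  have hself : (p.1, c') ∈ (pvStepB d p).items := PySem.Dict.mem_items_insert_self d p.1 c'
  have hbne : ∀ v : Int, (b, v) ∈ d.items → c' ≤ v → b ≠ p.1 := by
    intro v hv hle heq
    have := hgb v hv
    rw [heq] at this
    omega
  unfold pvStepA
  dsimp only
  have hgdc : ((d.insert p.1 (d.getD p.1 0 + pvWC p.2)).getD p.1 0) = c' :=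
    PySem.Dict.getD_insert_self d p.1 _ 0
  rw [hgdc]
  by_cases h1 : m ≤ c'
  · by_cases h2 : m = c'
    · -- tie: m = c', best becomes max(b, p.1)
      rw [if_pos h1, if_pos h2]
      dsimp only
      set b' := if b < p.1 then p.1 else b with hb'
      have hbb' : b ≤ b' := by
        rw [hb']; split_ifs with h; exact le_of_lt h; exact le_rfl
      have hpb' : p.1 ≤ b' := by
        rw [hb']; split_ifs with h; exact le_rfl; exact not_lt.mp h
      have hb'cases : b' = p.1 ∨ b' = b := by
        rw [hb']; split_ifs; exact Or.inl rfl; exact Or.inr rfl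
      have hbm : (b, m) ∈ d.items := by
        rcases hach with ⟨hm0, _⟩ | hin
        · omega
        · exact hin
      have hbp : b ≠ p.1 := hbne m hbm (le_of_eq h2.symm)
      refine ⟨hnd', ?_, ?_⟩
      · intro q hq
        rcases (hmem q).mp hq with hq1 | ⟨hq2, _⟩
        · subst hq1
          exact ⟨hc1, Or.inr ⟨h2.symm ▸ rfl, hpb'⟩⟩
        · obtain ⟨hv1, hv2⟩ := hdom q hq2
          refine ⟨hv1, ?_⟩
          rcases hv2 with hlt | ⟨he, hle⟩
          · exact Or.inl hlt
          · exact Or.inr ⟨he, le_trans hle hbb'⟩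
      · rcases hb'cases with he | he
        · rw [he]
          exact Or.inr (h2 ▸ hself)
        · rw [he]
          exact Or.inr ((hmem (b, m)).mpr (Or.inr ⟨hbm, hbp⟩))
    · -- new strict max c', best = p.1
      rw [if_pos h1, if_neg h2]
      dsimp only
      refine ⟨hnd', ?_, Or.inr hself⟩
      intro q hq
      rcases (hmem q).mp hq with hq1 | ⟨hq2, _⟩
      · subst hq1; exact ⟨hc1, Or.inr ⟨rfl, le_rfl⟩⟩
      · obtain ⟨hv1, hv2⟩ := hdom q hq2
        refine ⟨hv1, Or.inl ?_⟩
        rcases hv2 with hlt | ⟨he, _⟩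
        · omega
        · omega
  · -- c' < m : nothing changes
    rw [if_neg h1]
    dsimp only
    have hmc : c' < m := by omega
    refine ⟨hnd', ?_, ?_⟩
    · intro q hq
      rcases (hmem q).mp hq with hq1 | ⟨hq2, _⟩
      · subst hq1; exact ⟨hc1, Or.inl hmc⟩
      · exact hdom q hq2
    · rcases hach with ⟨hm0, _⟩ | hin
      · omega
      · exact Or.inr ((hmem (b, m)).mpr (Or.inr ⟨hin, hbne m hin (le_of_lt hmc)⟩))

lemma pvInv_fold :
    ∀ (L : List (String × String)) (d : PySem.Dict String Int) (m : Int) (b : String),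
      pvInv d m b →
      (L.foldl pvStepA (d, m, b)).1 = L.foldl pvStepB d ∧
        pvInv (L.foldl pvStepB d) (L.foldl pvStepA (d, m, b)).2.1 (L.foldl pvStepA (d, m, b)).2.2 := by
  intro L
  induction L with
  | nil => intro d m b h; exact ⟨rfl, h⟩
  | cons p t ih =>
    intro d m b h
    have hstep := pvInv_step d m b p h
    have hsplit : pvStepA (d, m, b) p =
        (pvStepB d p, (pvStepA (d, m, b) p).2.1, (pvStepA (d, m, b) p).2.2) := by
      rw [← pvStepA_fst (d, m, b) p]
    simp only [List.foldl_cons]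
    rw [hsplit]
    exact ih (pvStepB d p) _ _ hstep

-- max with a (count, name) key, when one element strictly dominates all others
def pvSel (k1 : String → Int) (acc : Option String) (x : String) : Option String :=
  match acc with
  | none => some x
  | some m =>
    if (decide (k1 m < k1 x) || !decide (k1 x < k1 m) && decide (m < x)) then some x else some m

lemma pvMax2_eq (xs : List String) (k1 : String → Int) :
    PySem.List.max2? xs k1 (fun s => s) = xs.foldl (pvSel k1) none := by
  unfold PySem.List.max2?
  congr 1
  funext acc x
  cases acc <;> rfl

lemma pvSel_some (k1 : String → Int) (m x : String) :
    pvSel k1 (some m) x =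
      if (decide (k1 m < k1 x) || !decide (k1 x < k1 m) && decide (m < x)) then some x
      else some m := rfl

lemma pvCond_false (k1 : String → Int) (b x : String)
    (h : k1 x < k1 b ∨ (k1 x = k1 b ∧ x ≤ b)) :
    (decide (k1 b < k1 x) || !decide (k1 x < k1 b) && decide (b < x)) = false := by
  rcases h with h | ⟨h1, h2⟩
  · simp [h, not_lt.mpr (le_of_lt h)]
  · simp [h1, not_lt.mpr h2]

lemma pvCond_true (k1 : String → Int) (a b : String)
    (h : k1 a < k1 b ∨ (k1 a = k1 b ∧ a < b)) :
    (decide (k1 a < k1 b) || !decide (k1 b < k1 a) && decide (a < b)) = true := by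
  rcases h with h | ⟨h1, h2⟩
  · simp [h]
  · simp [h1, h2]

lemma pvSel_keep (k1 : String → Int) (b x : String)
    (h : k1 x < k1 b ∨ (k1 x = k1 b ∧ x ≤ b)) : pvSel k1 (some b) x = some b := by
  rw [pvSel_some, pvCond_false k1 b x h]
  simp

lemma pvSel_take (k1 : String → Int) (a b : String)
    (h : k1 a < k1 b ∨ (k1 a = k1 b ∧ a < b)) : pvSel k1 (some a) b = some b := by
  rw [pvSel_some, pvCond_true k1 a b h]
  simp

lemma pvSel_absorb (k1 : String → Int) (b : String) :
    ∀ (xs : List String), (∀ y ∈ xs, k1 y < k1 b ∨ (k1 y = k1 b ∧ y ≤ b)) →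
      xs.foldl (pvSel k1) (some b) = some b := by
  intro xs
  induction xs with
  | nil => intro _; rfl
  | cons x t ih =>
    intro hd
    simp only [List.foldl_cons, pvSel_keep k1 b x (hd x (by simp))]
    exact ih (fun y hy => hd y (by simp [hy]))

lemma pvSel_main (k1 : String → Int) (b : String) :
    ∀ (xs : List String),
      (∀ y ∈ xs, y = b ∨ k1 y < k1 b ∨ (k1 y = k1 b ∧ y < b)) → b ∈ xs →
      ∀ (acc : Option String),
        (acc = none ∨ acc = some b ∨ ∃ a, acc = some a ∧ (k1 a < k1 b ∨ (k1 a = k1 b ∧ a < b))) →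
        xs.foldl (pvSel k1) acc = some b := by
  intro xs
  induction xs with
  | nil => intro _ hb; exact absurd hb (by simp)
  | cons x t ih =>
    intro hd hb acc hacc
    have hdt : ∀ y ∈ t, y = b ∨ k1 y < k1 b ∨ (k1 y = k1 b ∧ y < b) :=
      fun y hy => hd y (by simp [hy])
    by_cases hxb : x = b
    · -- after seeing b the accumulator is some b, and it absorbs the rest
      subst hxb
      have hstep : pvSel k1 acc x = some x := by
        rcases hacc with rfl | rfl | ⟨a, rfl, hsd⟩
        · rfl
        · exact pvSel_keep k1 x x (Or.inr ⟨rfl, le_rfl⟩)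
        · exact pvSel_take k1 a x hsd
      simp only [List.foldl_cons, hstep]
      refine pvSel_absorb k1 x t ?_
      intro y hy
      rcases hdt y hy with rfl | h | ⟨h1, h2⟩
      · exact Or.inr ⟨rfl, le_rfl⟩
      · exact Or.inl h
      · exact Or.inr ⟨h1, le_of_lt h2⟩
    · have hbt : b ∈ t := by
        rcases List.mem_cons.mp hb with h1 | h1
        · exact absurd h1.symm hxb
        · exact h1
      have hsdx : k1 x < k1 b ∨ (k1 x = k1 b ∧ x < b) := by
        rcases hd x (by simp) with h1 | h1 | h1
        · exact absurd h1 hxb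
        · exact Or.inl h1
        · exact Or.inr h1
      have hacc' : pvSel k1 acc x = some b ∨
          ∃ a, pvSel k1 acc x = some a ∧ (k1 a < k1 b ∨ (k1 a = k1 b ∧ a < b)) := by
        rcases hacc with rfl | rfl | ⟨a, rfl, hsd⟩
        · exact Or.inr ⟨x, rfl, hsdx⟩
        · left
          refine pvSel_keep k1 b x ?_
          rcases hsdx with h | ⟨h1, h2⟩
          · exact Or.inl h
          · exact Or.inr ⟨h1, le_of_lt h2⟩
        · right
          rw [pvSel_some]
          split_ifs
          · exact ⟨x, rfl, hsdx⟩
          · exact ⟨a, rfl, hsd⟩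
      simp only [List.foldl_cons]
      rcases hacc' with h1 | ⟨a, h1, h2⟩
      · rw [h1]; exact ih hdt hbt (some b) (Or.inr (Or.inl rfl))
      · rw [h1]; exact ih hdt hbt (some a) (Or.inr (Or.inr ⟨a, rfl, h2⟩))

-- ===== VERDICT (by name: the statement is the Claim_ definition above) =====
theorem largestWordCount1_spec : Claim_equal_largestWordCount1 := by
  intro messages senders _ hpre
  unfold Spec_largestWordCount1
  unfold Pre_largestWordCount1 at hpre
  have hA : largestWordCount1 messages senders =
      ((senders.zip messages).foldl pvStepA
        ((PySem.Dict.empty : PySem.Dict String Int), ((0 : Int), ""))).2.2 :=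
    congrArg (fun r : PySem.Dict String Int × Int × String => r.2.2)
      (pvIndexFold pvStepA messages senders hpre
        ((PySem.Dict.empty : PySem.Dict String Int), ((0 : Int), "")))
  have hbase : pvInv (PySem.Dict.empty : PySem.Dict String Int) 0 "" := by
    refine ⟨?_, ?_, Or.inl ⟨rfl, rfl⟩⟩ <;>
      simp [PySem.Dict.empty, PySem.Dict.keys]
  obtain ⟨hdict, hinv⟩ := pvInv_fold (senders.zip messages)
    (PySem.Dict.empty : PySem.Dict String Int) 0 "" hbase
  set d := (senders.zip messages).foldl pvStepB (PySem.Dict.empty : PySem.Dict String Int) with hd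
  set MM := ((senders.zip messages).foldl pvStepA
    ((PySem.Dict.empty : PySem.Dict String Int), ((0 : Int), ""))).2.1 with hMM
  set BB := ((senders.zip messages).foldl pvStepA
    ((PySem.Dict.empty : PySem.Dict String Int), ((0 : Int), ""))).2.2 with hBB
  have hB : largestWordCount1_alt messages senders =
      (if d.size = 0 then ""
       else (PySem.List.max2? d.keys (fun s => d.getD s 0) (fun s => s)).getD "") := rfl
  rw [hA, hB]
  by_cases hemp : d.items = []
  · have hsz : d.size = 0 := by simp [PySem.Dict.size, hemp]
    rw [if_pos hsz]
    rcases hinv.2.2 with ⟨_, hBe⟩ | hin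
    · exact hBe
    · rw [hemp] at hin
      exact absurd hin (List.not_mem_nil)
  · have hin : (BB, MM) ∈ d.items := by
      rcases hinv.2.2 with ⟨hM0, _⟩ | hin
      · exfalso
        obtain ⟨q, hq⟩ := List.exists_mem_of_ne_nil d.items hemp
        obtain ⟨h1, h2⟩ := hinv.2.1 q hq
        rw [hM0] at h2
        rcases h2 with h2 | ⟨h2, _⟩ <;> omega
      · exact hin
    have hsz : ¬ d.size = 0 := by
      simp only [PySem.Dict.size, List.length_eq_zero_iff]
      exact hemp
    have hnd := hinv.1
    have hgB : d.getD BB 0 = MM := PySem.Dict.getD_of_mem_items d hin hnd 0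
    have hkeys : BB ∈ d.keys := by
      simp only [PySem.Dict.keys]
      exact List.mem_map_of_mem hin
    have hdomk : ∀ y ∈ d.keys,
        y = BB ∨ d.getD y 0 < d.getD BB 0 ∨ (d.getD y 0 = d.getD BB 0 ∧ y < BB) := by
      intro y hy
      simp only [PySem.Dict.keys] at hy
      obtain ⟨q, hq, hq1⟩ := List.mem_map.mp hy
      have hqmem : (q.1, q.2) ∈ d.items := by rwa [Prod.mk.eta]
      have hgq : d.getD q.1 0 = q.2 := PySem.Dict.getD_of_mem_items d hqmem hnd 0
      obtain ⟨h1, h2⟩ := hinv.2.1 q hq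
      subst hq1
      by_cases hyB : q.1 = BB
      · exact Or.inl hyB
      · rcases h2 with h2 | ⟨h2, h3⟩
        · exact Or.inr (Or.inl (by rw [hgq, hgB]; exact h2))
        · exact Or.inr (Or.inr ⟨by rw [hgq, hgB]; exact h2, lt_of_le_of_ne h3 hyB⟩)
    rw [if_neg hsz, pvMax2_eq]
    rw [pvSel_main (fun s => d.getD s 0) BB d.keys hdomk hkeys none (Or.inl rfl)]
    rfl
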